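-- pv_equiv track=rewrite | github.com/signalnine/tildebin | ipmi_sel_monitor.py | format_plain
-- ===== SOURCE A (Python) =====
-- def format_plain(entries, sel_info, warn_only=False, verbose=False):
--     """Format SEL data as plain text."""
--     output = []
--
--     # Show SEL info if verbose
--     if verbose and sel_info:
--         output.append("SEL Information:")
--         for key, value in sel_info.items():
--             output.append(f"  {key}: {value}")
--         output.append("")
--
--     # Filter to warnings/critical only if requested
--     if warn_only:
--         entries = [e for e in entries if e.get('severity') in ['WARNING', 'CRITICAL']]
--
--     if not entries:
--         if warn_only:
--             output.append("No warning or critical events found in SEL.")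
--         else:
--             output.append("No entries found in SEL.")
--         return '\n'.join(output)
--
--     output.append(f"Found {len(entries)} SEL entries:")
--     output.append("")
--
--     # Group by severity
--     critical_entries = [e for e in entries if e.get('severity') == 'CRITICAL']
--     warning_entries = [e for e in entries if e.get('severity') == 'WARNING']
--     info_entries = [e for e in entries if e.get('severity') == 'INFO']
--
--     if critical_entries:
--         output.append(f"CRITICAL Events ({len(critical_entries)}):")
--         for entry in critical_entries:
--             output.append(f"  [{entry['id']}] {entry['date']} {entry['time']}")
--             output.append(f"      {entry['sensor']}: {entry['event']} - {entry['status']}")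
--         output.append("")
--
--     if warning_entries:
--         output.append(f"WARNING Events ({len(warning_entries)}):")
--         for entry in warning_entries:
--             output.append(f"  [{entry['id']}] {entry['date']} {entry['time']}")
--             output.append(f"      {entry['sensor']}: {entry['event']} - {entry['status']}")
--         output.append("")
--
--     if info_entries and not warn_only:
--         output.append(f"INFO Events ({len(info_entries)}):")
--         for entry in info_entries:
--             output.append(f"  [{entry['id']}] {entry['date']} {entry['time']}")
--             output.append(f"      {entry['sensor']}: {entry['event']} - {entry['status']}")
--         output.append("")
--
--     return '\n'.join(output)
-- ===== SOURCE B (Python) =====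
-- def format_plain(entries, sel_info, warn_only=False, verbose=False):
--     """Format SEL data as plain text."""
--     output = []
--
--     if verbose and sel_info:
--         output.append("SEL Information:")
--         for key, value in sel_info.items():
--             output.append(f"  {key}: {value}")
--         output.append("")
--
--     if warn_only:
--         entries = [e for e in entries if e.get('severity') in ['WARNING', 'CRITICAL']]
--
--     if not entries:
--         output.append("No warning or critical events found in SEL." if warn_only
--                       else "No entries found in SEL.")
--         return '\n'.join(output)
--
--     output.append(f"Found {len(entries)} SEL entries:")
--     output.append("")
--
--     # Stable-sort the entries by severity rank, then emit the groups with a single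
--     # run-detection scan over the sorted list (rank 3 = severities never displayed).
--     rank = {'CRITICAL': 0, 'WARNING': 1, 'INFO': 2}
--     labels = ['CRITICAL', 'WARNING', 'INFO']
--     ordered = sorted(entries, key=lambda e: rank.get(e.get('severity'), 3))
--     rest = ordered
--     while rest:
--         r = rank.get(rest[0].get('severity'), 3)
--         k = 1
--         while k < len(rest) and rank.get(rest[k].get('severity'), 3) == r:
--             k += 1
--         run, rest = rest[:k], rest[k:]
--         if r < 3:
--             output.append(f"{labels[r]} Events ({len(run)}):")
--             for e in run:
--                 output.append(f"  [{e['id']}] {e['date']} {e['time']}")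
--                 output.append(f"      {e['sensor']}: {e['event']} - {e['status']}")
--             output.append("")
--
--     return '\n'.join(output)
-- ===== Notes on version B (the rewrite author's own statement) =====
-- stated objective: alternative
-- what changed: B replaces A's three severity filter passes and three copy-pasted emission blocks by a stable sort of the entries on a severity rank (CRITICAL=0, WARNING=1, INFO=2, other=3) followed by a single run-detection scan over the sorted list that emits each group's header and body; stability preserves within-group order and rank 3 runs are skipped, so the output is identical.
import Mathlib
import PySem

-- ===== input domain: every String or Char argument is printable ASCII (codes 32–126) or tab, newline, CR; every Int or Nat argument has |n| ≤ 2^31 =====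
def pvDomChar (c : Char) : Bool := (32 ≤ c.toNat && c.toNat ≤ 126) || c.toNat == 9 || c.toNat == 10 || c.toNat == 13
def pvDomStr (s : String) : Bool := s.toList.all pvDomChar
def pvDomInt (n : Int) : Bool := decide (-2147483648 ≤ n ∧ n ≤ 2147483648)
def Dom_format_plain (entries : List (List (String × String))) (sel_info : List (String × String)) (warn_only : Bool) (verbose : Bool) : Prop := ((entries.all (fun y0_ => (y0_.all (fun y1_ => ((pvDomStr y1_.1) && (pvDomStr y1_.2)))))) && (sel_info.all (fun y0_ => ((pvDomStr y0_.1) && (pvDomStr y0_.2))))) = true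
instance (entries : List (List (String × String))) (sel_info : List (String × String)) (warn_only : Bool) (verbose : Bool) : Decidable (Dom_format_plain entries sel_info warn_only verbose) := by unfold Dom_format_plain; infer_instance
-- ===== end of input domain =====

-- B replaces A's three severity filter passes and three copied emission blocks by a stable
-- sort on a severity rank followed by one run-detection scan (objective: alternative).

-- ===== PORT A =====
-- e.get('severity') (entries are dicts ported as assoc lists; lookup = first match)
def pvSev (e : List (String × String)) : Option String := (PySem.Dict.mk e).get? "severity"
-- e[k]: exact under Pre_format_plain, which guarantees the key is present wherever A or B reads it
def pvKey (e : List (String × String)) (k : String) : String := (PySem.Dict.mk e).getD k ""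

def format_plain (entries : List (List (String × String))) (sel_info : List (String × String)) (warn_only : Bool) (verbose : Bool) : String :=
  let output : List String :=
    if verbose && !sel_info.isEmpty then
      ["SEL Information:"] ++ sel_info.map (fun kv => "  " ++ kv.1 ++ ": " ++ kv.2) ++ [""]
    else []
  let entries :=
    if warn_only then
      entries.filter (fun e => pvSev e == some "WARNING" || pvSev e == some "CRITICAL")
    else entries
  if entries.isEmpty then
    PySem.Str.join "\n" (output ++
      [if warn_only then "No warning or critical events found in SEL." else "No entries found in SEL."])
  else
    let output := output ++ ["Found " ++ PySem.Int.toStr (entries.length : Int) ++ " SEL entries:", ""]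
    let critical_entries := entries.filter (fun e => pvSev e == some "CRITICAL")
    let warning_entries := entries.filter (fun e => pvSev e == some "WARNING")
    let info_entries := entries.filter (fun e => pvSev e == some "INFO")
    let output := output ++
      (if !critical_entries.isEmpty then
        ["CRITICAL Events (" ++ PySem.Int.toStr (critical_entries.length : Int) ++ "):"] ++
        critical_entries.flatMap (fun e =>
          ["  [" ++ pvKey e "id" ++ "] " ++ pvKey e "date" ++ " " ++ pvKey e "time",
           "      " ++ pvKey e "sensor" ++ ": " ++ pvKey e "event" ++ " - " ++ pvKey e "status"]) ++ [""]
      else [])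
    let output := output ++
      (if !warning_entries.isEmpty then
        ["WARNING Events (" ++ PySem.Int.toStr (warning_entries.length : Int) ++ "):"] ++
        warning_entries.flatMap (fun e =>
          ["  [" ++ pvKey e "id" ++ "] " ++ pvKey e "date" ++ " " ++ pvKey e "time",
           "      " ++ pvKey e "sensor" ++ ": " ++ pvKey e "event" ++ " - " ++ pvKey e "status"]) ++ [""]
      else [])
    let output := output ++
      (if !info_entries.isEmpty && !warn_only then
        ["INFO Events (" ++ PySem.Int.toStr (info_entries.length : Int) ++ "):"] ++
        info_entries.flatMap (fun e =>
          ["  [" ++ pvKey e "id" ++ "] " ++ pvKey e "date" ++ " " ++ pvKey e "time",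
           "      " ++ pvKey e "sensor" ++ ": " ++ pvKey e "event" ++ " - " ++ pvKey e "status"]) ++ [""]
      else [])
    PySem.Str.join "\n" output

-- ===== PORT B =====
-- rank.get(e.get('severity'), 3) — the severity-rank key B sorts by
def pvRank (e : List (String × String)) : Int :=
  match pvSev e with
  | some s => (PySem.Dict.mk [("CRITICAL", (0 : Int)), ("WARNING", (1 : Int)), ("INFO", (2 : Int))]).getD s 3
  | none => 3

-- B's shared two-line entry formatter (the body of B's inner `for e in run` loop)
def pvFmtEntry (e : List (String × String)) : List String :=
  ["  [" ++ pvKey e "id" ++ "] " ++ pvKey e "date" ++ " " ++ pvKey e "time",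
   "      " ++ pvKey e "sensor" ++ ": " ++ pvKey e "event" ++ " - " ++ pvKey e "status"]

-- B's inner counting loop: `k = 1; while k < len(rest) and rank(rest[k]) == r: k += 1`
-- (this counts the part beyond position 0; pvEmit adds the 1)
def pvRunLen (r : Int) : List (List (String × String)) → Nat
  | [] => 0
  | e :: tl => if pvRank e == r then pvRunLen r tl + 1 else 0

-- B's outer `while rest:` run-detection scan over the sorted list
def pvEmit : List (List (String × String)) → List String
  | [] => []
  | e :: tl =>
    let r := pvRank e
    let k := pvRunLen r tl + 1
    let run := (e :: tl).take k
    let rest := (e :: tl).drop k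
    (if r < 3 then
      [PySem.List.pyGetD ["CRITICAL", "WARNING", "INFO"] r "" ++ " Events (" ++
        PySem.Int.toStr (run.length : Int) ++ "):"] ++ run.flatMap pvFmtEntry ++ [""]
     else []) ++ pvEmit rest
  termination_by l => l.length
  decreasing_by simp

def format_plain_alt (entries : List (List (String × String))) (sel_info : List (String × String)) (warn_only : Bool) (verbose : Bool) : String :=
  let output : List String :=
    if verbose && !sel_info.isEmpty then
      ["SEL Information:"] ++ sel_info.map (fun kv => "  " ++ kv.1 ++ ": " ++ kv.2) ++ [""]
    else []
  let entries :=
    if warn_only then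
      entries.filter (fun e => pvSev e == some "WARNING" || pvSev e == some "CRITICAL")
    else entries
  if entries.isEmpty then
    PySem.Str.join "\n" (output ++
      [if warn_only then "No warning or critical events found in SEL." else "No entries found in SEL."])
  else
    let output := output ++ ["Found " ++ PySem.Int.toStr (entries.length : Int) ++ " SEL entries:", ""]
    let ordered := PySem.List.sorted entries pvRank
    PySem.Str.join "\n" (output ++ pvEmit ordered)

-- ===== PRECONDITION & SPEC =====
-- Pre_ excludes exactly the inputs on which A raises KeyError: an entry that A displays
-- (severity CRITICAL or WARNING, or INFO when warn_only is false) but that lacks one of the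
-- six displayed keys.
def Pre_format_plain (entries : List (List (String × String))) (sel_info : List (String × String)) (warn_only : Bool) (verbose : Bool) : Prop :=
  (entries.all (fun e =>
    let sev := pvSev e
    if sev == some "CRITICAL" || sev == some "WARNING" || (sev == some "INFO" && !warn_only) then
      ["id", "date", "time", "sensor", "event", "status"].all (fun k => (PySem.Dict.mk e).contains k)
    else true)) = true
instance (entries : List (List (String × String))) (sel_info : List (String × String)) (warn_only : Bool) (verbose : Bool) : Decidable (Pre_format_plain entries sel_info warn_only verbose) := by unfold Pre_format_plain; infer_instance

def pvWitness_format_plain : (List (List (String × String))) × (List (String × String)) × Bool × Bool :=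
  ([[("severity", "CRITICAL"), ("id", "1"), ("date", "2024-01-01"), ("time", "12:00:00"),
     ("sensor", "Temp"), ("event", "Upper Critical"), ("status", "Asserted")],
    [("severity", "INFO"), ("id", "2"), ("date", "2024-01-02"), ("time", "13:00:00"),
     ("sensor", "Fan"), ("event", "OK"), ("status", "Deasserted")]],
   [("version", "1.5")], false, true)

def Spec_format_plain (entries : List (List (String × String))) (sel_info : List (String × String)) (warn_only : Bool) (verbose : Bool) (out : String) : Prop := out = format_plain_alt entries sel_info warn_only verbose
instance (entries : List (List (String × String))) (sel_info : List (String × String)) (warn_only : Bool) (verbose : Bool) (out : String) : Decidable (Spec_format_plain entries sel_info warn_only verbose out) := by unfold Spec_format_plain; infer_instance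

-- ===== CLAIM (what is proved, stated in full; the proofs are below) =====
def Claim_equal_format_plain : Prop := ∀ (entries : List (List (String × String))) (sel_info : List (String × String)) (warn_only : Bool) (verbose : Bool), Dom_format_plain entries sel_info warn_only verbose → Pre_format_plain entries sel_info warn_only verbose → Spec_format_plain entries sel_info warn_only verbose (format_plain entries sel_info warn_only verbose)

-- ===== LEMMAS AND PROOFS =====

-- pvRank computed by cases on the severity string
theorem pvRank_eq (e : List (String × String)) :
    pvRank e = if pvSev e == some "CRITICAL" then 0 else if pvSev e == some "WARNING" then 1
               else if pvSev e == some "INFO" then 2 else 3 := by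
  cases h : pvSev e with
  | none => simp [pvRank, h]
  | some s =>
    by_cases h1 : s = "CRITICAL"
    · subst h1; simp [pvRank, h, PySem.Dict.getD, PySem.Dict.get?]
    · by_cases h2 : s = "WARNING"
      · subst h2; simp [pvRank, h, PySem.Dict.getD, PySem.Dict.get?]
      · by_cases h3 : s = "INFO"
        · subst h3; simp [pvRank, h, PySem.Dict.getD, PySem.Dict.get?]
        · have c1 : ("CRITICAL" == s) = false := by simp [Ne.symm h1]
          have c2 : ("WARNING" == s) = false := by simp [Ne.symm h2]
          have c3 : ("INFO" == s) = false := by simp [Ne.symm h3]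
          simp [pvRank, h, PySem.Dict.getD, PySem.Dict.get?, List.find?,
            c1, c2, c3, h1, h2, h3]

theorem pvRank_mem (e : List (String × String)) :
    pvRank e = 0 ∨ pvRank e = 1 ∨ pvRank e = 2 ∨ pvRank e = 3 := by
  rw [pvRank_eq]; split_ifs <;> simp

theorem sev_of_rank_zero (e : List (String × String)) :
    pvRank e = 0 ↔ pvSev e = some "CRITICAL" := by
  rw [pvRank_eq]; split_ifs <;> simp_all

theorem sev_of_rank_one (e : List (String × String)) :
    pvRank e = 1 ↔ pvSev e = some "WARNING" := by
  rw [pvRank_eq]; split_ifs <;> simp_all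

theorem sev_of_rank_two (e : List (String × String)) :
    pvRank e = 2 ↔ pvSev e = some "INFO" := by
  rw [pvRank_eq]; split_ifs <;> simp_all

-- pvEmit on the empty list (unfolding lemma for the WF-recursive scan)
theorem pvEmit_nil : pvEmit [] = [] := by rw [pvEmit]

-- insertBy skips a prefix it is not inserted before
theorem insertBy_skip (p : (List (String × String)) → (List (String × String)) → Bool)
    (x : List (String × String)) (pre suf : List (List (String × String)))
    (h : ∀ y ∈ pre, p x y = false) :
    PySem.List.insertBy p x (pre ++ suf) = pre ++ PySem.List.insertBy p x suf := by
  induction pre with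
  | nil => simp
  | cons y tl ih =>
    have hy : p x y = false := h y (by simp)
    simp only [List.cons_append, PySem.List.insertBy, hy]
    simp [ih (fun z hz => h z (by simp [hz]))]

-- insertBy goes to the front of a suffix it is inserted before everywhere
theorem insertBy_front (p : (List (String × String)) → (List (String × String)) → Bool)
    (x : List (String × String)) (suf : List (List (String × String)))
    (h : ∀ y ∈ suf, p x y = true) :
    PySem.List.insertBy p x suf = x :: suf := by
  cases suf with
  | nil => rfl
  | cons y tl => simp [PySem.List.insertBy, h y (by simp)]

-- one insertion step of the stable sort, on a list already arranged in rank buckets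
theorem insertBy_buckets (x : List (String × String))
    (a0 a1 a2 a3 : List (List (String × String)))
    (h0 : ∀ y ∈ a0, pvRank y = 0) (h1 : ∀ y ∈ a1, pvRank y = 1)
    (h2 : ∀ y ∈ a2, pvRank y = 2) (h3 : ∀ y ∈ a3, pvRank y = 3) :
    PySem.List.insertBy (fun a b => decide (pvRank a < pvRank b)) x (a0 ++ a1 ++ a2 ++ a3) =
      if pvRank x = 0 then (a0 ++ [x]) ++ a1 ++ a2 ++ a3
      else if pvRank x = 1 then a0 ++ (a1 ++ [x]) ++ a2 ++ a3
      else if pvRank x = 2 then a0 ++ a1 ++ (a2 ++ [x]) ++ a3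
      else a0 ++ a1 ++ a2 ++ (a3 ++ [x]) := by
  rcases pvRank_mem x with hr | hr | hr | hr
  · rw [show a0 ++ a1 ++ a2 ++ a3 = a0 ++ (a1 ++ a2 ++ a3) by simp,
      insertBy_skip _ _ _ _ (by intro y hy; simp [hr, h0 y hy]),
      insertBy_front _ _ _ (by
        intro y hy; simp only [List.append_assoc, List.mem_append] at hy
        rcases hy with hy | hy | hy
        · simp [hr, h1 y hy]
        · simp [hr, h2 y hy]
        · simp [hr, h3 y hy])]
    simp [hr]
  · rw [show a0 ++ a1 ++ a2 ++ a3 = (a0 ++ a1) ++ (a2 ++ a3) by simp,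
      insertBy_skip _ _ _ _ (by
        intro y hy; simp only [List.mem_append] at hy
        rcases hy with hy | hy
        · simp [hr, h0 y hy]
        · simp [hr, h1 y hy]),
      insertBy_front _ _ _ (by
        intro y hy; simp only [List.mem_append] at hy
        rcases hy with hy | hy
        · simp [hr, h2 y hy]
        · simp [hr, h3 y hy])]
    simp [hr]
  · rw [show a0 ++ a1 ++ a2 ++ a3 = (a0 ++ a1 ++ a2) ++ a3 by simp,
      insertBy_skip _ _ _ _ (by
        intro y hy; simp only [List.append_assoc, List.mem_append] at hy
        rcases hy with hy | hy | hy
        · simp [hr, h0 y hy]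
        · simp [hr, h1 y hy]
        · simp [hr, h2 y hy]),
      insertBy_front _ _ _ (by intro y hy; simp [hr, h3 y hy])]
    simp [hr]
  · rw [show a0 ++ a1 ++ a2 ++ a3 = (a0 ++ a1 ++ a2 ++ a3) ++ [] by simp,
      insertBy_skip _ _ _ _ (by
        intro y hy; simp only [List.append_assoc, List.mem_append] at hy
        rcases hy with hy | hy | hy | hy
        · simp [hr, h0 y hy]
        · simp [hr, h1 y hy]
        · simp [hr, h2 y hy]
        · simp [hr, h3 y hy])]
    simp [hr, PySem.List.insertBy]

-- the insertion-sort fold sends rank buckets to rank buckets extended by the rank filters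
theorem foldl_insertBy_buckets (xs : List (List (String × String)))
    (a0 a1 a2 a3 : List (List (String × String)))
    (h0 : ∀ y ∈ a0, pvRank y = 0) (h1 : ∀ y ∈ a1, pvRank y = 1)
    (h2 : ∀ y ∈ a2, pvRank y = 2) (h3 : ∀ y ∈ a3, pvRank y = 3) :
    xs.foldl (fun acc x => PySem.List.insertBy (fun a b => decide (pvRank a < pvRank b)) x acc)
        (a0 ++ a1 ++ a2 ++ a3) =
      (a0 ++ xs.filter (fun e => pvRank e == 0)) ++ (a1 ++ xs.filter (fun e => pvRank e == 1)) ++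
      (a2 ++ xs.filter (fun e => pvRank e == 2)) ++ (a3 ++ xs.filter (fun e => pvRank e == 3)) := by
  induction xs generalizing a0 a1 a2 a3 with
  | nil => simp
  | cons x tl ih =>
    simp only [List.foldl_cons, List.filter_cons]
    rw [insertBy_buckets x a0 a1 a2 a3 h0 h1 h2 h3]
    rcases pvRank_mem x with hr | hr | hr | hr
    · rw [if_pos hr, ih (a0 ++ [x]) a1 a2 a3
        (by intro y hy; rcases List.mem_append.1 hy with hy | hy; exact h0 y hy; simp_all) h1 h2 h3]
      simp [hr]
    · rw [if_neg (by simp [hr]), if_pos hr, ih a0 (a1 ++ [x]) a2 a3 h0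
        (by intro y hy; rcases List.mem_append.1 hy with hy | hy; exact h1 y hy; simp_all) h2 h3]
      simp [hr]
    · rw [if_neg (by simp [hr]), if_neg (by simp [hr]), if_pos hr, ih a0 a1 (a2 ++ [x]) a3 h0 h1
        (by intro y hy; rcases List.mem_append.1 hy with hy | hy; exact h2 y hy; simp_all) h3]
      simp [hr]
    · rw [if_neg (by simp [hr]), if_neg (by simp [hr]), if_neg (by simp [hr]),
        ih a0 a1 a2 (a3 ++ [x]) h0 h1 h2
        (by intro y hy; rcases List.mem_append.1 hy with hy | hy; exact h3 y hy; simp_all)]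
      simp [hr]

-- the stable sort by rank is exactly the concatenation of the four rank filters
theorem sorted_rank_eq (xs : List (List (String × String))) :
    PySem.List.sorted xs pvRank =
      xs.filter (fun e => pvRank e == 0) ++ xs.filter (fun e => pvRank e == 1) ++
      xs.filter (fun e => pvRank e == 2) ++ xs.filter (fun e => pvRank e == 3) := by
  rw [PySem.List.sorted_eq_foldl_insertBy]
  simpa using foldl_insertBy_buckets xs [] [] [] [] (by simp) (by simp) (by simp) (by simp)

-- the inner counting loop counts exactly a homogeneous run
theorem pvRunLen_spec (r : Int) (xs rest : List (List (String × String)))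
    (hxs : ∀ y ∈ xs, pvRank y = r) (hrest : ∀ y ∈ rest, pvRank y ≠ r) :
    pvRunLen r (xs ++ rest) = xs.length := by
  induction xs with
  | nil =>
    cases rest with
    | nil => rfl
    | cons y tl => simp [pvRunLen, hrest y (by simp)]
  | cons y tl ih =>
    simp [pvRunLen, hxs y (by simp), ih (fun z hz => hxs z (by simp [hz])) ]

-- unfolding lemma for B's scan on a nonempty list
theorem pvEmit_cons (e : List (String × String)) (tl : List (List (String × String))) :
    pvEmit (e :: tl) =
      (if pvRank e < 3 then
        [PySem.List.pyGetD ["CRITICAL", "WARNING", "INFO"] (pvRank e) "" ++ " Events (" ++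
          PySem.Int.toStr (((e :: tl).take (pvRunLen (pvRank e) tl + 1)).length : Int) ++ "):"] ++
        ((e :: tl).take (pvRunLen (pvRank e) tl + 1)).flatMap pvFmtEntry ++ [""]
       else []) ++ pvEmit ((e :: tl).drop (pvRunLen (pvRank e) tl + 1)) := by
  rw [pvEmit.eq_def]

-- one iteration of B's outer scan consumes one homogeneous run
theorem pvEmit_run (r : Int) (x : List (String × String))
    (xs rest : List (List (String × String)))
    (hx : pvRank x = r) (hxs : ∀ y ∈ xs, pvRank y = r) (hrest : ∀ y ∈ rest, pvRank y ≠ r) :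
    pvEmit (x :: xs ++ rest) =
      (if r < 3 then
        [PySem.List.pyGetD ["CRITICAL", "WARNING", "INFO"] r "" ++ " Events (" ++
          PySem.Int.toStr ((x :: xs).length : Int) ++ "):"] ++
        (x :: xs).flatMap pvFmtEntry ++ [""]
       else []) ++ pvEmit rest := by
  have hk : pvRunLen (pvRank x) (xs ++ rest) = xs.length := by
    rw [hx]; exact pvRunLen_spec r xs rest hxs hrest
  have htake : (x :: (xs ++ rest)).take (pvRunLen (pvRank x) (xs ++ rest) + 1) = x :: xs := by
    rw [hk, show x :: (xs ++ rest) = (x :: xs) ++ rest by simp,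
      show xs.length + 1 = (x :: xs).length by simp, List.take_left]
  have hdrop : (x :: (xs ++ rest)).drop (pvRunLen (pvRank x) (xs ++ rest) + 1) = rest := by
    rw [hk, show x :: (xs ++ rest) = (x :: xs) ++ rest by simp,
      show xs.length + 1 = (x :: xs).length by simp, List.drop_left]
  rw [show x :: xs ++ rest = x :: (xs ++ rest) by simp, pvEmit_cons, htake, hdrop, hx]

-- one bucket (possibly empty) consumed by B's scan
theorem pvEmit_block (r : Int) (b rest : List (List (String × String)))
    (hb : ∀ y ∈ b, pvRank y = r) (hrest : ∀ y ∈ rest, pvRank y ≠ r) :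
    pvEmit (b ++ rest) =
      (if b.isEmpty then [] else
        if r < 3 then
          [PySem.List.pyGetD ["CRITICAL", "WARNING", "INFO"] r "" ++ " Events (" ++
            PySem.Int.toStr (b.length : Int) ++ "):"] ++ b.flatMap pvFmtEntry ++ [""]
        else []) ++ pvEmit rest := by
  cases b with
  | nil => simp
  | cons x xs =>
    rw [show (x :: xs) ++ rest = x :: xs ++ rest by simp,
      pvEmit_run r x xs rest (hb x (by simp)) (fun y hy => hb y (by simp [hy])) hrest]
    simp

-- B's sorted-scan emission equals A's three guarded blocks
theorem pvEmit_eq_blocks (ent : List (List (String × String))) (warn_only : Bool)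
    (hw : warn_only = true → ∀ e ∈ ent, pvSev e == some "WARNING" || pvSev e == some "CRITICAL") :
    pvEmit (PySem.List.sorted ent pvRank) =
      (if !(ent.filter (fun e => pvSev e == some "CRITICAL")).isEmpty then
        ["CRITICAL Events (" ++ PySem.Int.toStr ((ent.filter (fun e => pvSev e == some "CRITICAL")).length : Int) ++ "):"] ++
        (ent.filter (fun e => pvSev e == some "CRITICAL")).flatMap pvFmtEntry ++ [""] else []) ++
      (if !(ent.filter (fun e => pvSev e == some "WARNING")).isEmpty then
        ["WARNING Events (" ++ PySem.Int.toStr ((ent.filter (fun e => pvSev e == some "WARNING")).length : Int) ++ "):"] ++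
        (ent.filter (fun e => pvSev e == some "WARNING")).flatMap pvFmtEntry ++ [""] else []) ++
      (if !(ent.filter (fun e => pvSev e == some "INFO")).isEmpty && !warn_only then
        ["INFO Events (" ++ PySem.Int.toStr ((ent.filter (fun e => pvSev e == some "INFO")).length : Int) ++ "):"] ++
        (ent.filter (fun e => pvSev e == some "INFO")).flatMap pvFmtEntry ++ [""] else []) := by
  have hf0 : ent.filter (fun e => pvRank e == 0) = ent.filter (fun e => pvSev e == some "CRITICAL") := by
    apply List.filter_congr; intro e _
    by_cases hz : pvRank e = 0 <;> by_cases hc : pvSev e = some "CRITICAL" <;>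
      simp_all [sev_of_rank_zero]
  have hf1 : ent.filter (fun e => pvRank e == 1) = ent.filter (fun e => pvSev e == some "WARNING") := by
    apply List.filter_congr; intro e _
    by_cases hz : pvRank e = 1 <;> by_cases hc : pvSev e = some "WARNING" <;>
      simp_all [sev_of_rank_one]
  have hf2 : ent.filter (fun e => pvRank e == 2) = ent.filter (fun e => pvSev e == some "INFO") := by
    apply List.filter_congr; intro e _
    by_cases hz : pvRank e = 2 <;> by_cases hc : pvSev e = some "INFO" <;>
      simp_all [sev_of_rank_two]
  have mem_filter_rank : ∀ (r : Int) (y : List (String × String)),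
      y ∈ ent.filter (fun e => pvRank e == r) → pvRank y = r := by
    intro r y hy; have := List.of_mem_filter hy; simpa using this
  rw [sorted_rank_eq, List.append_assoc, List.append_assoc,
    pvEmit_block 0 _ _ (mem_filter_rank 0) (by
      intro y hy; simp only [List.mem_append] at hy
      rcases hy with hy | hy | hy <;> simp [mem_filter_rank _ _ hy]),
    pvEmit_block 1 _ _ (mem_filter_rank 1) (by
      intro y hy; simp only [List.mem_append] at hy
      rcases hy with hy | hy <;> simp [mem_filter_rank _ _ hy]),
    pvEmit_block 2 _ _ (mem_filter_rank 2) (by intro y hy; simp [mem_filter_rank _ _ hy]),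
    show pvEmit (ent.filter (fun e => pvRank e == 3)) =
        pvEmit (ent.filter (fun e => pvRank e == 3) ++ []) by rw [List.append_nil],
    pvEmit_block 3 _ [] (mem_filter_rank 3) (by simp), pvEmit_nil]
  have hlab0 : PySem.List.pyGetD ["CRITICAL", "WARNING", "INFO"] 0 "" = "CRITICAL" := rfl
  have hlab1 : PySem.List.pyGetD ["CRITICAL", "WARNING", "INFO"] 1 "" = "WARNING" := rfl
  have hlab2 : PySem.List.pyGetD ["CRITICAL", "WARNING", "INFO"] 2 "" = "INFO" := rfl
  rw [hlab0, hlab1, hlab2, hf0, hf1, hf2]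
  cases warn_only with
  | false =>
    simp only [Bool.not_false, Bool.and_true]
    by_cases c0 : (List.filter (fun e => pvSev e == some "CRITICAL") ent).isEmpty <;>
    by_cases c1 : (List.filter (fun e => pvSev e == some "WARNING") ent).isEmpty <;>
    by_cases c2 : (List.filter (fun e => pvSev e == some "INFO") ent).isEmpty <;>
      simp [c0, c1, c2]
  | true =>
    have h2 : ent.filter (fun e => pvSev e == some "INFO") = [] := by
      rw [List.filter_eq_nil_iff]; intro e he
      have := hw rfl e he
      simp only [Bool.or_eq_true, beq_iff_eq] at this
      rcases this with h | h <;> simp [h]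
    simp only [h2]
    by_cases c0 : (List.filter (fun e => pvSev e == some "CRITICAL") ent).isEmpty <;>
    by_cases c1 : (List.filter (fun e => pvSev e == some "WARNING") ent).isEmpty <;>
      simp [c0, c1]

-- ===== VERDICT (by name: the statement is the Claim_ definition above) =====
theorem format_plain_spec : Claim_equal_format_plain := by
  intro entries sel_info warn_only verbose _ _
  unfold Spec_format_plain format_plain format_plain_alt
  set ent := (if warn_only then
      entries.filter (fun e => pvSev e == some "WARNING" || pvSev e == some "CRITICAL")
    else entries) with hent
  have hw : warn_only = true → ∀ e ∈ ent, pvSev e == some "WARNING" || pvSev e == some "CRITICAL" := by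
    intro h e he
    rw [hent, h] at he
    simp at he
    simpa using he.2
  by_cases he : ent.isEmpty
  · simp [he]
  · simp only [he, if_false, Bool.false_eq_true]
    have hfmt : pvFmtEntry = (fun e =>
        ["  [" ++ pvKey e "id" ++ "] " ++ pvKey e "date" ++ " " ++ pvKey e "time",
         "      " ++ pvKey e "sensor" ++ ": " ++ pvKey e "event" ++ " - " ++ pvKey e "status"]) := rfl
    rw [pvEmit_eq_blocks ent warn_only hw, hfmt]
    simp [List.append_assoc]
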